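-- pv_equiv track=rewrite | github.com/dhruva7254/MyPython | Practice1/01-05-2024/scenario_based_q1.py | favorite_characters
-- ===== SOURCE A (Python) =====
-- def favorite_characters(text):
--     text = text.lower()
--     char_counts = {}
--     for char in text:
--         char_counts[char] = char_counts.get(char, 0) + 1
--     max_count = max(char_counts.values(), default=0)
--     favorite_chars = [char for char, count in char_counts.items() if count == max_count]
--     return len(favorite_chars)
-- ===== SOURCE B (Python) =====
-- def favorite_characters(text):
--     s = text.lower()
--     freq_of_count = {}
--     for ch in set(s):
--         c = sum(1 for x in s if x == ch)
--         freq_of_count[c] = freq_of_count.get(c, 0) + 1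
--     if not freq_of_count:
--         return 0
--     return freq_of_count[max(freq_of_count)]
-- ===== Notes on version B (the rewrite author's own statement) =====
-- stated objective: alternative
-- what changed: Instead of building a char->count dict, taking max of the counts and re-scanning the dict to filter characters at that max, B iterates once over the distinct characters, inverts counts into a count->number-of-characters table and returns the table entry at its maximum key (0 for empty text).
import Mathlib
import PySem

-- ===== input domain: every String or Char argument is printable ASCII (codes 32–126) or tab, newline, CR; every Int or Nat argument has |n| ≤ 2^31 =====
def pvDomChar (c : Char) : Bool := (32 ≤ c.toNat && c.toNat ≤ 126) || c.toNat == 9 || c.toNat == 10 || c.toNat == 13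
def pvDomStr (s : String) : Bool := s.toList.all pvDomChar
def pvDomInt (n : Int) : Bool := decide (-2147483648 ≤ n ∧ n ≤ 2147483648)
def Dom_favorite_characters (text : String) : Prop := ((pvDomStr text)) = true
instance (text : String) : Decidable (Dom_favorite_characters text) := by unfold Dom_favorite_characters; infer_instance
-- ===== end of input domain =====

-- B replaces A's max-then-filter pair of passes over the count dict by a single inversion of the
-- counts into a count→number-of-characters table plus one lookup at the maximal count (alternative decomposition).

-- ===== PORT A =====
def favorite_characters (text : String) : Int :=
  let t := PySem.Str.lower text
  let char_counts := t.toList.foldl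
    (fun d c => d.insert c (d.getD c 0 + 1)) (PySem.Dict.empty : PySem.Dict Char Int)
  let max_count := (PySem.List.max? char_counts.values (fun v => v)).getD 0
  let favorite_chars := char_counts.items.filter (fun p => p.2 == max_count)
  (favorite_chars.length : Int)

-- ===== PORT B =====
def favorite_characters_alt (text : String) : Int :=
  let s := PySem.Str.lower text
  let freq_of_count := (PySem.Set.ofList s.toList).foldl
    (fun d ch =>
      let c := s.toList.foldl (fun a x => if x == ch then a + (1 : Int) else a) 0
      d.insert c (d.getD c 0 + 1))
    (PySem.Dict.empty : PySem.Dict Int Int)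
  match PySem.List.max? freq_of_count.keys (fun k => k) with
  | none => 0
  | some m => (freq_of_count.get? m).getD 0  -- m is a key of freq_of_count, so get? never misses

-- ===== PRECONDITION & SPEC =====
def Spec_favorite_characters (text : String) (out : Int) : Prop := out = favorite_characters_alt text
instance (text : String) (out : Int) : Decidable (Spec_favorite_characters text out) := by unfold Spec_favorite_characters; infer_instance

-- ===== CLAIM (what is proved, stated in full; the proofs are below) =====
def Claim_equal_favorite_characters : Prop := ∀ (text : String), Dom_favorite_characters text → Spec_favorite_characters text (favorite_characters text)

-- ===== LEMMAS AND PROOFS =====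

theorem fc_main (xs : List Char) :
    (((xs.foldl (fun d c => d.insert c (d.getD c 0 + 1)) (PySem.Dict.empty : PySem.Dict Char Int)).items.filter
        (fun p => p.2 == (PySem.List.max? (xs.foldl (fun d c => d.insert c (d.getD c 0 + 1)) (PySem.Dict.empty : PySem.Dict Char Int)).values (fun v => v)).getD 0)).length : Int)
    =
    (match PySem.List.max? ((PySem.Set.ofList xs).foldl
        (fun d ch => d.insert (xs.foldl (fun a x => if x == ch then a + (1 : Int) else a) 0)
          ((d.getD (xs.foldl (fun a x => if x == ch then a + (1 : Int) else a) 0) 0) + 1))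
        (PySem.Dict.empty : PySem.Dict Int Int)).keys (fun k => k) with
      | none => 0
      | some m => (((PySem.Set.ofList xs).foldl
        (fun d ch => d.insert (xs.foldl (fun a x => if x == ch then a + (1 : Int) else a) 0)
          ((d.getD (xs.foldl (fun a x => if x == ch then a + (1 : Int) else a) 0) 0) + 1))
        (PySem.Dict.empty : PySem.Dict Int Int)).get? m).getD 0) := by
  simp only [PySem.List.foldl_beq_add_one, zero_add]
  have hB : (PySem.Set.ofList xs).foldl
        (fun d ch => d.insert ((xs.count ch : Int)) ((d.getD ((xs.count ch : Int)) 0) + 1))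
        (PySem.Dict.empty : PySem.Dict Int Int)
      = PySem.Dict.counter ((PySem.Set.ofList xs).map (fun ch => (xs.count ch : Int))) := by
    rw [← PySem.Dict.foldl_insert_getD_add_one_eq_counter, List.foldl_map]
  rw [hB, PySem.Dict.foldl_insert_getD_add_one_eq_counter, PySem.Dict.keys_counter]
  set vs := (PySem.Set.ofList xs).map (fun ch => (xs.count ch : Int)) with hvs
  have hvals : (PySem.Dict.counter xs).values = vs := by
    simp [PySem.Dict.values, PySem.Dict.items_counter, hvs]
  rw [hvals]
  rcases h : PySem.List.max? (PySem.Set.ofList vs) (fun k => k) with _ | m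
  · have hnil : vs = [] := by
      have h2 := (PySem.List.max?_eq_none_iff (PySem.Set.ofList vs) (fun k => k)).mp h
      rcases hv : vs with _ | ⟨v, t⟩
      · rfl
      · exfalso
        have : v ∈ PySem.Set.ofList vs := (PySem.Set.mem_ofList _ v).mpr (by simp [hv])
        rw [h2] at this; simp at this
    have hx : PySem.Set.ofList xs = [] := by
      rcases hx : PySem.Set.ofList xs with _ | _
      · rfl
      · rw [hx] at hvs; simp [hvs] at hnil
    simp [PySem.Dict.items_counter, hx]
  · -- nonempty case
    have hm : m ∈ vs := (PySem.Set.mem_ofList vs m).mp (PySem.List.max?_mem h)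
    have hvsne : vs ≠ [] := by intro hv; rw [hv] at hm; simp at hm
    rcases ha : PySem.List.max? vs (fun v => v) with _ | a
    · exact absurd ((PySem.List.max?_eq_none_iff vs _).mp ha) hvsne
    · have ham : a = m := by
        have h1 := PySem.List.max?_isMax ha m hm
        have h2 := PySem.List.max?_isMax h a ((PySem.Set.mem_ofList vs a).mpr (PySem.List.max?_mem ha))
        omega
      simp only [Option.getD_some, ham]
      -- LHS: (items.filter (·.2 == m)).length = vs.count m ; RHS: (get? m).getD 0 = vs.count m
      have hget : (PySem.Dict.counter vs).get? m = some ((vs.count m : Int)) := by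
        apply PySem.Dict.get?_of_mem_items
        · rw [PySem.Dict.items_counter]
          exact List.mem_map.mpr ⟨m, (PySem.Set.mem_ofList vs m).mpr hm, rfl⟩
        · exact PySem.Dict.nodup_keys_counter vs
      rw [hget]
      simp [PySem.Dict.items_counter, List.filter_map, List.count_eq_countP, List.countP_map, hvs]
      simp [Function.comp_def, List.countP_eq_length_filter]

-- ===== VERDICT (by name: the statement is the Claim_ definition above) =====
theorem favorite_characters_spec : Claim_equal_favorite_characters := by
  intro text _
  show favorite_characters text = favorite_characters_alt text
  simp only [favorite_characters, favorite_characters_alt]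
  exact fc_main (PySem.Str.lower text).toList
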